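-- pv_equiv track=rewrite | github.com/AviralGup7/Singularity-Zero | src/core/utils/stderr_classification.py | extract_degraded_providers
-- ===== SOURCE A (Python) =====
-- _KNOWN_PROVIDERS = (
--     "gau",
--     "waybackurls",
--     "katana",
--     "httpx",
--     "subfinder",
--     "assetfinder",
--     "amass",
--     "nuclei",
-- )
--
-- def extract_degraded_providers(lines: list[str]) -> list[str]:
--     providers: list[str] = []
--     for raw_line in lines:
--         lowered = str(raw_line or "").lower()
--         for provider in _KNOWN_PROVIDERS:
--             if provider in lowered and provider not in providers:
--                 providers.append(provider)
--     return providers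
-- ===== SOURCE B (Python) =====
-- _KNOWN_PROVIDERS = (
--     "gau",
--     "waybackurls",
--     "katana",
--     "httpx",
--     "subfinder",
--     "assetfinder",
--     "amass",
--     "nuclei",
-- )
--
-- def extract_degraded_providers(lines: list[str]) -> list[str]:
--     # Occurrence-table decomposition: first lower every line, then compute for each
--     # known provider the index of the first line containing it, then emit providers
--     # grouped by that first-occurrence index (provider order breaks ties).
--     lowered = [str(raw_line or "").lower() for raw_line in lines]
--     firsts = {
--         provider: next((i for i, line in enumerate(lowered) if provider in line), None)
--         for provider in _KNOWN_PROVIDERS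
--     }
--     return [
--         provider
--         for i in range(len(lowered))
--         for provider in _KNOWN_PROVIDERS
--         if firsts[provider] == i
--     ]
-- ===== Notes on version B (the rewrite author's own statement) =====
-- stated objective: alternative
-- what changed: B first builds a first-occurrence table (provider -> index of the first lowered line containing it) and then emits providers grouped by that index in a separate pass, instead of A's nested scan that appends into the result with an inline membership dedup.
import Mathlib
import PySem

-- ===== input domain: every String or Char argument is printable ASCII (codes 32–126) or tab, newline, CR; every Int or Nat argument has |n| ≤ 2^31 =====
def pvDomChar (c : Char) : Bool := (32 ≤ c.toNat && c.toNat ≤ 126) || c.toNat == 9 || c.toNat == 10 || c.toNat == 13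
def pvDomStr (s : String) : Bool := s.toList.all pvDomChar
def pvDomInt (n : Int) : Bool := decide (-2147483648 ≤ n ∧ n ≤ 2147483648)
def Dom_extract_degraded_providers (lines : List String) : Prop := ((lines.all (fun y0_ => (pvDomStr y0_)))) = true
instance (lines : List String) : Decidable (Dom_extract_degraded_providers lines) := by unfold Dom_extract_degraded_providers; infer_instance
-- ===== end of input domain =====

-- B replaces A's nested scan with inline dedup by a first-occurrence table followed by a
-- grouping pass over line indices (alternative decomposition, same asymptotic cost).

-- ===== PORT A =====
def pvKnownProviders : List String :=
  ["gau", "waybackurls", "katana", "httpx", "subfinder", "assetfinder", "amass", "nuclei"]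

def extract_degraded_providers (lines : List String) : List String :=
  lines.foldl (fun providers raw_line =>
    let lowered := PySem.Str.lower (if raw_line = "" then "" else raw_line)
    pvKnownProviders.foldl (fun providers provider =>
      if PySem.Str.isIn provider lowered && !(providers.contains provider)
      then providers ++ [provider] else providers) providers) []

-- ===== PORT B =====
def extract_degraded_providers_alt (lines : List String) : List String :=
  let lowered := lines.map (fun raw_line => PySem.Str.lower (if raw_line = "" then "" else raw_line))
  let firsts : PySem.Dict String (Option Int) :=
    pvKnownProviders.foldl (fun d provider =>
      d.insert provider
        (((PySem.List.enumerate lowered).find? (fun e => PySem.Str.isIn provider e.2)).map (·.1)))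
      PySem.Dict.empty
  (PySem.List.pyRange 0 (PySem.List.len lowered) 1).flatMap (fun i =>
    pvKnownProviders.filter (fun provider => firsts.getD provider none == some i))

-- ===== PRECONDITION & SPEC =====
def Spec_extract_degraded_providers (lines : List String) (out : List String) : Prop := out = extract_degraded_providers_alt lines
instance (lines : List String) (out : List String) : Decidable (Spec_extract_degraded_providers lines out) := by unfold Spec_extract_degraded_providers; infer_instance

-- ===== CLAIM (what is proved, stated in full; the proofs are below) =====
def Claim_equal_extract_degraded_providers : Prop := ∀ (lines : List String), Dom_extract_degraded_providers lines → Spec_extract_degraded_providers lines (extract_degraded_providers lines)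

-- ===== LEMMAS AND PROOFS =====

/-- First index (as a Nat) of a line containing `p`, spec-level helper for the proofs. -/
def pvFirst (L : List String) (p : String) : Option Nat :=
  match L with
  | [] => none
  | l :: ls => if PySem.Str.isIn p l then some 0 else (pvFirst ls p).map (· + 1)

lemma pvFind_enumerate (p : String) :
    ∀ (L : List String) (s : Int),
      (((PySem.List.enumerate L s).find? (fun e => PySem.Str.isIn p e.2)).map (·.1))
        = (pvFirst L p).map (fun k => s + (k : Int)) := by
  intro L
  induction L with
  | nil => intro s; simp [PySem.List.enumerate_nil, pvFirst]
  | cons l ls ih =>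
    intro s
    rw [PySem.List.enumerate_cons]
    by_cases h : PySem.Chars.isIn p.toList l.toList = true
    · simp [h, pvFirst]
    · rw [List.find?_cons_of_neg (by simp [h])]
      rw [ih (s + 1)]
      simp only [pvFirst, PySem.Str.isIn_eq, h, Bool.false_eq_true, if_false]
      cases pvFirst ls p with
      | none => simp
      | some k => simp; ring

lemma pvDict_getD (f : String → Option Int) (p : String) :
    ∀ (ks : List String) (d : PySem.Dict String (Option Int)), ks.Nodup →
      (ks.foldl (fun d q => d.insert q (f q)) d).getD p none
        = if p ∈ ks then f p else d.getD p none := by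
  intro ks
  induction ks with
  | nil => intro d _; simp
  | cons k rest ih =>
    intro d hnd
    have hnd' := hnd
    rw [List.nodup_cons] at hnd'
    simp only [List.foldl_cons, ih _ hnd'.2]
    by_cases hk : p = k
    · subst hk
      simp [hnd'.1]
    · by_cases hm : p ∈ rest <;> simp [hm, hk, PySem.Dict.getD_insert]

/-- One line of A's inner loop appends exactly the new providers occurring in the line. -/
lemma pvInner (low : String) :
    ∀ (ks : List String) (acc : List String), ks.Nodup →
      ks.foldl (fun a q =>
        if PySem.Str.isIn q low && !(a.contains q) then a ++ [q] else a) acc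
        = acc ++ ks.filter (fun q => PySem.Str.isIn q low && !(acc.contains q)) := by
  intro ks
  induction ks with
  | nil => intro acc _; simp
  | cons k rest ih =>
    intro acc hnd
    rw [List.nodup_cons] at hnd
    by_cases h : (PySem.Str.isIn k low && !(acc.contains k)) = true
    · simp only [List.foldl_cons, ih _ hnd.2, List.filter_cons, h, if_pos]
      rw [List.filter_congr (l := rest)
        (q := fun q => PySem.Str.isIn q low && !(acc.contains q)) ?_]
      · simp
      · intro q hq
        have hne : q ≠ k := fun he => hnd.1 (he ▸ hq)
        simp [hne]
    · simp only [List.foldl_cons, ih _ hnd.2, List.filter_cons, h]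
      simp

/-- A's whole loop, characterised: output grouped by first-occurrence index. -/
lemma pvOuter :
    ∀ (L : List String) (acc : List String),
      L.foldl (fun a low => pvKnownProviders.foldl (fun a q =>
          if PySem.Str.isIn q low && !(a.contains q) then a ++ [q] else a) a) acc
        = acc ++ (List.range L.length).flatMap (fun k =>
            pvKnownProviders.filter (fun q => pvFirst L q == some k && !(acc.contains q))) := by
  intro L
  induction L with
  | nil => intro acc; simp
  | cons l ls ih =>
    intro acc
    have hnd : pvKnownProviders.Nodup := by decide
    simp only [List.foldl_cons, pvInner l _ _ hnd, ih]
    rw [List.length_cons, List.range_succ_eq_map]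
    simp only [List.flatMap_cons, List.flatMap_map]
    rw [List.append_assoc]
    congr 1
    congr 1
    · apply List.filter_congr
      intro q _
      simp only [pvFirst, PySem.Str.isIn_eq]
      by_cases h : PySem.Chars.isIn q.toList l.toList = true
      · simp [h]
      · simp only [h, Bool.false_eq_true, if_false]
        cases pvFirst ls q <;> simp
    · apply List.flatMap_congr
      intro k _
      apply List.filter_congr
      intro q hq
      have hco : (acc ++ List.filter (fun q => PySem.Str.isIn q l && !acc.contains q) pvKnownProviders).contains q
          = (acc.contains q || (PySem.Str.isIn q l && !acc.contains q)) := by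
        by_cases hm : q ∈ acc <;> by_cases h : PySem.Str.isIn q l = true <;>
          simp [List.contains_eq_mem, List.mem_filter, hm, hq]
      rw [hco]
      simp only [pvFirst, PySem.Str.isIn_eq]
      by_cases h : PySem.Chars.isIn q.toList l.toList = true
      · simp [h]
      · simp only [h, Bool.false_eq_true, if_false]
        cases pvFirst ls q <;> simp [Nat.succ_eq_add_one]

-- ===== VERDICT (by name: the statement is the Claim_ definition above) =====
theorem extract_degraded_providers_spec : Claim_equal_extract_degraded_providers := by
  intro lines _
  unfold Spec_extract_degraded_providers
  have hnd : pvKnownProviders.Nodup := by decide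
  set L := lines.map (fun raw_line => PySem.Str.lower (if raw_line = "" then "" else raw_line)) with hL
  have hA : extract_degraded_providers lines
      = (List.range L.length).flatMap (fun k =>
          pvKnownProviders.filter (fun q => pvFirst L q == some k)) := by
    have h := pvOuter L []
    rw [hL, List.foldl_map] at h
    unfold extract_degraded_providers
    rw [hL]
    simpa using h
  have hB : extract_degraded_providers_alt lines
      = (List.range L.length).flatMap (fun k =>
          pvKnownProviders.filter (fun q => pvFirst L q == some k)) := by
    simp only [extract_degraded_providers_alt]
    rw [← hL]
    rw [show PySem.List.len L = ((L.length : Nat) : Int) by simp [PySem.List.len_eq],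
      PySem.List.pyRange_zero_natCast, List.flatMap_map]
    apply List.flatMap_congr
    intro k _
    apply List.filter_congr
    intro q hq
    rw [pvDict_getD (fun provider =>
        (((PySem.List.enumerate L).find? (fun e => PySem.Str.isIn provider e.2)).map (·.1)))
        q pvKnownProviders PySem.Dict.empty hnd]
    rw [if_pos hq, pvFind_enumerate q L 0]
    cases pvFirst L q <;> simp
  rw [hA, hB]
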